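-- pv_equiv track=rewrite | github.com/ZG21/Algorithm-Checker | New_Subsets.py | generate_full_combs
-- ===== SOURCE A (Python) =====
-- def generar_parejas_vacio(arr, vacios, estado):
--     for elem in arr:
--         if estado == "actual":
--             pareja1 = [["0"], [elem]]
--             if pareja1 not in vacios:
--                 vacios.append(pareja1)
--         if estado == "futuro":
--             pareja2 = [[elem], ["0"]]
--             if pareja2 not in vacios:
--                 vacios.append(pareja2)
--     return vacios
--
-- def generar_combinaciones(array):
--     def backtrack(start, path):
--         # Agregar la combinación actual a los resultados
--         combinaciones.append(path)
--         # Generar todas las combinaciones posibles comenzando desde 'start'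
--         for i in range(start, len(array)):
--             backtrack(i + 1, path + [array[i]])
--     combinaciones = []
--     backtrack(0, [])
--     return combinaciones[1:]  # Excluir la combinación vacía
--
-- def generate_full_combs(component):
--     numeradores = generar_combinaciones(component[0])
--     denominadores = generar_combinaciones(component[1])
--     full_comb = []
--     vacios_actuales = []
--     vacios_futuros = []
--     for comb in numeradores:
--         for comb2 in denominadores:
--             if len(comb) > 1:
--                 vacios_futuros = generar_parejas_vacio(comb, vacios_futuros, "futuro")
--             if len(comb2) > 1:
--                 vacios_actuales = generar_parejas_vacio(comb2, vacios_actuales, "actual")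
--             if not (comb == component[0] and comb2 == component[1]):
--                 full_comb.append([comb, comb2])
--     full_comb.extend(vacios_actuales)
--     full_comb.extend(vacios_futuros)
--     return full_comb
-- ===== SOURCE B (Python) =====
-- def generar_combinaciones(array):
--     def backtrack(start, path):
--         combinaciones.append(path)
--         for i in range(start, len(array)):
--             backtrack(i + 1, path + [array[i]])
--     combinaciones = []
--     backtrack(0, [])
--     return combinaciones[1:]
--
-- def _dedup(arr):
--     seen = []
--     for e in arr:
--         if e not in seen:
--             seen.append(e)
--     return seen
--
-- def generate_full_combs(component):
--     numeradores = generar_combinaciones(component[0])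
--     denominadores = generar_combinaciones(component[1])
--     full_comb = [[c1, c2] for c1 in numeradores for c2 in denominadores
--                  if not (c1 == component[0] and c2 == component[1])]
--     # the vacio pairs are collected only when at least one pair was examined
--     if numeradores and denominadores:
--         if len(component[1]) > 1:
--             full_comb += [[["0"], [e]] for e in _dedup(component[1])]
--         if len(component[0]) > 1:
--             full_comb += [[[e], ["0"]] for e in _dedup(component[0])]
--     return full_comb
-- ===== Notes on version B (the rewrite author's own statement) =====
-- stated objective: simpler
-- what changed: B builds the pair list as a single cartesian-product comprehension and computes the two vacio lists by one dedup pass each over component[0]/component[1] (guarded by 'any pair was examined'), instead of threading and re-deduplicating the vacio accumulators inside the nested product loop.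
import Mathlib
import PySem

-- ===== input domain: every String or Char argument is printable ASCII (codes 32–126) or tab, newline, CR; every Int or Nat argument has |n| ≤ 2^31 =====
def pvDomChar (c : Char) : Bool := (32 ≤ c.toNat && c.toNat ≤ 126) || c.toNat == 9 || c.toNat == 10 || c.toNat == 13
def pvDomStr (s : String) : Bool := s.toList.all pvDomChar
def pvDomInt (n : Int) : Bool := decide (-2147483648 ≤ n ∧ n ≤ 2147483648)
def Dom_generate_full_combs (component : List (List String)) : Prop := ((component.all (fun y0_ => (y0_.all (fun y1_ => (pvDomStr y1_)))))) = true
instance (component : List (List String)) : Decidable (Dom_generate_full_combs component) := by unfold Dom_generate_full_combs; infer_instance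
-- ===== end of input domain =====

-- B builds the pair list as one cartesian-product comprehension and the vacio lists by a single
-- dedup pass over each input component, instead of threading dedup accumulators through the
-- nested product loop (objective: simpler).


-- ===== PORT A =====
-- backtrack(start, path): combinaciones gets path, then recursively all extensions from index start.
-- pvBtrack returns the combinations appended by one call; pvChildren those appended by its for-loop.
mutual
def pvBtrack (arr : List String) (s : Nat) (p : List String) : List (List String) :=
  p :: pvChildren arr s p
termination_by (arr.length - s, 1)
def pvChildren (arr : List String) (s : Nat) (p : List String) : List (List String) :=
  if h : s < arr.length then
    pvBtrack arr (s + 1) (p ++ [arr[s]]) ++ pvChildren arr (s + 1) p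
  else []
termination_by (arr.length - s, 0)
decreasing_by
  · exact Prod.Lex.left _ _ (by omega)
  · exact Prod.Lex.left _ _ (by omega)
end

def generar_combinaciones (array : List String) : List (List String) :=
  (pvBtrack array 0 []).drop 1   -- combinaciones[1:]

def generar_parejas_vacio (arr : List String) (vacios : List (List (List String))) (estado : String) :
    List (List (List String)) :=
  arr.foldl (fun vac elem =>
    let vac := if estado == "actual" then
        (if [["0"], [elem]] ∈ vac then vac else vac ++ [[["0"], [elem]]]) else vac
    if estado == "futuro" then
        (if [[elem], ["0"]] ∈ vac then vac else vac ++ [[[elem], ["0"]]]) else vac) vacios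

def generate_full_combs (component : List (List String)) : List (List (List String)) :=
  match component with
  | c0 :: c1 :: _ =>
    let numeradores := generar_combinaciones c0
    let denominadores := generar_combinaciones c1
    let st : List (List (List String)) × List (List (List String)) × List (List (List String)) :=
      numeradores.foldl (fun st comb =>
        denominadores.foldl (fun st comb2 =>
          let vf := if 1 < comb.length then generar_parejas_vacio comb st.2.2 "futuro" else st.2.2
          let va := if 1 < comb2.length then generar_parejas_vacio comb2 st.2.1 "actual" else st.2.1
          let fc := if ¬(comb = c0 ∧ comb2 = c1) then st.1 ++ [[comb, comb2]] else st.1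
          (fc, va, vf)) st) ([], [], [])
    st.1 ++ st.2.1 ++ st.2.2
  | _ => []   -- component[0] / component[1] would raise IndexError; excluded by Pre_

-- ===== PORT B =====
-- Source B carries its own copy of generar_combinaciones; ported here under its own names
mutual
def pvBtrackAlt (arr : List String) (s : Nat) (p : List String) : List (List String) :=
  p :: pvChildrenAlt arr s p
termination_by (arr.length - s, 1)
def pvChildrenAlt (arr : List String) (s : Nat) (p : List String) : List (List String) :=
  if h : s < arr.length then
    pvBtrackAlt arr (s + 1) (p ++ [arr[s]]) ++ pvChildrenAlt arr (s + 1) p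
  else []
termination_by (arr.length - s, 0)
decreasing_by
  · exact Prod.Lex.left _ _ (by omega)
  · exact Prod.Lex.left _ _ (by omega)
end

def generar_combinaciones_alt (array : List String) : List (List String) :=
  (pvBtrackAlt array 0 []).drop 1   -- combinaciones[1:]

def pvDedup (arr : List String) : List String :=
  arr.foldl (fun seen e => if e ∈ seen then seen else seen ++ [e]) []

def generate_full_combs_alt (component : List (List String)) : List (List (List String)) :=
  -- component[0], component[1]; exact on the inputs Pre_ admits (length ≥ 2)
  let c0 := component.getD 0 []
  let c1 := component.getD 1 []
  let numeradores := generar_combinaciones_alt c0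
  let denominadores := generar_combinaciones_alt c1
  let full_comb := numeradores.flatMap (fun a =>
    (denominadores.filter (fun b => ¬(a = c0 ∧ b = c1))).map (fun b => [a, b]))
  if numeradores ≠ [] ∧ denominadores ≠ [] then
    let full_comb := if 1 < c1.length then
        full_comb ++ (pvDedup c1).map (fun e => [["0"], [e]]) else full_comb
    if 1 < c0.length then
        full_comb ++ (pvDedup c0).map (fun e => [[e], ["0"]]) else full_comb
  else full_comb

-- ===== PRECONDITION & SPEC =====
-- Pre_ excludes only lists with fewer than two components, on which A raises IndexError.
def Pre_generate_full_combs (component : List (List String)) : Prop := 2 ≤ component.length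
instance (component : List (List String)) : Decidable (Pre_generate_full_combs component) := by
  unfold Pre_generate_full_combs; infer_instance

def pvWitness_generate_full_combs : List (List String) := [["a", "b"], ["c"]]

def Spec_generate_full_combs (component : List (List String)) (out : List (List (List String))) : Prop :=
  out = generate_full_combs_alt component
instance (component : List (List String)) (out : List (List (List String))) :
    Decidable (Spec_generate_full_combs component out) := by unfold Spec_generate_full_combs; infer_instance

-- ===== CLAIM (what is proved, stated in full; the proofs are below) =====
def Claim_equal_generate_full_combs : Prop := ∀ (component : List (List String)),
  Dom_generate_full_combs component → Pre_generate_full_combs component →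
  Spec_generate_full_combs component (generate_full_combs component)

-- ===== LEMMAS AND PROOFS =====

def pvAddAll (mk : String → List (List String)) (acc : List (List (List String))) (xs : List String) :
    List (List (List String)) :=
  xs.foldl (fun a e => if mk e ∈ a then a else a ++ [mk e]) acc

lemma mem_pvAddAll {mk acc xs} {y : List (List String)} :
    y ∈ pvAddAll mk acc xs ↔ y ∈ acc ∨ ∃ e ∈ xs, mk e = y := by
  induction xs generalizing acc with
  | nil => simp [pvAddAll]
  | cons x xs ih =>
    simp only [pvAddAll, List.foldl_cons] at *
    rw [ih]
    by_cases h : mk x ∈ acc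
    · simp only [if_pos h, List.mem_cons]
      constructor
      · rintro (h' | ⟨e, he, rfl⟩)
        · exact Or.inl h'
        · exact Or.inr ⟨e, Or.inr he, rfl⟩
      · rintro (h' | ⟨e, (rfl | he), rfl⟩)
        · exact Or.inl h'
        · exact Or.inl h
        · exact Or.inr ⟨e, he, rfl⟩
    · simp only [if_neg h, List.mem_append, List.mem_singleton, List.mem_cons]
      constructor
      · rintro ((h' | (rfl | h0)) | ⟨e, he, rfl⟩)
        · exact Or.inl h'
        · exact Or.inr ⟨x, Or.inl rfl, rfl⟩
        · exact absurd h0 (List.not_mem_nil)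
        · exact Or.inr ⟨e, Or.inr he, rfl⟩
      · rintro (h' | ⟨e, (rfl | he), rfl⟩)
        · exact Or.inl (Or.inl h')
        · exact Or.inl (Or.inr (Or.inl rfl))
        · exact Or.inr ⟨e, he, rfl⟩

lemma pvAddAll_nochange {mk acc xs} (h : ∀ e ∈ xs, mk e ∈ acc) : pvAddAll mk acc xs = acc := by
  induction xs generalizing acc with
  | nil => rfl
  | cons x xs ih =>
    simp only [pvAddAll, List.foldl_cons, if_pos (h x (List.mem_cons_self))]
    exact ih fun e he => h e (List.mem_cons_of_mem _ he)

lemma pvAddAll_append {mk acc xs ys} :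
    pvAddAll mk acc (xs ++ ys) = pvAddAll mk (pvAddAll mk acc xs) ys := by
  simp [pvAddAll, List.foldl_append]

lemma mem_pvAddAll_mono {mk acc xs} {y : List (List String)} (h : y ∈ acc) : y ∈ pvAddAll mk acc xs :=
  mem_pvAddAll.2 (Or.inl h)

lemma mk_mem_pvAddAll {mk acc xs} {e : String} (he : e ∈ xs) : mk e ∈ pvAddAll mk acc xs :=
  mem_pvAddAll.2 (Or.inr ⟨e, he, rfl⟩)



def pvProc (mk : String → List (List String)) (cs : List (List String))
    (acc : List (List (List String))) : List (List (List String)) :=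
  cs.foldl (fun a c => if 1 < c.length then pvAddAll mk a c else a) acc

lemma pvProc_append {mk cs ds acc} :
    pvProc mk (cs ++ ds) acc = pvProc mk ds (pvProc mk cs acc) := by
  simp [pvProc, List.foldl_append]

lemma pvProc_children (mk : String → List (List String)) (arr : List String) :
    ∀ (k s : Nat) (p : List String) (acc : List (List (List String))), arr.length - s ≤ k →
    pvProc mk (pvChildren arr s p) acc =
      if s < arr.length ∧ 2 ≤ p.length + (arr.length - s)
      then pvAddAll mk (pvAddAll mk acc p) (arr.drop s) else acc := by
  intro k
  induction k with
  | zero =>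
    intro s p acc hk
    have hs : ¬ s < arr.length := by omega
    rw [pvChildren, dif_neg hs, if_neg (by tauto)]
    rfl
  | succ k ih =>
    intro s p acc hk
    by_cases hs : s < arr.length
    · rw [pvChildren, dif_pos hs]
      have hd : arr.drop s = arr[s] :: arr.drop (s+1) := List.drop_eq_getElem_cons hs
      set q : List String := p ++ [arr[s]] with hq
      have hql : q.length = p.length + 1 := by simp [hq]
      rw [pvBtrack]
      -- pvProc over (q :: C1) ++ C2
      rw [List.cons_append, show pvProc mk (q :: (pvChildren arr (s+1) q ++ pvChildren arr (s+1) p)) acc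
            = pvProc mk (pvChildren arr (s+1) q ++ pvChildren arr (s+1) p)
                (if 1 < q.length then pvAddAll mk acc q else acc) from rfl,
          pvProc_append]
      rw [ih (s+1) q _ (by omega), ih (s+1) p _ (by omega)]
      by_cases hC : 2 ≤ p.length + (arr.length - s)
      · have hSq : pvAddAll mk (if 1 < q.length then pvAddAll mk acc q else acc) q = pvAddAll mk acc q := by
          by_cases hq1 : 1 < q.length
          · rw [if_pos hq1]
            exact pvAddAll_nochange fun e he => mk_mem_pvAddAll he
          · rw [if_neg hq1]
        have hqd : pvAddAll mk (pvAddAll mk acc q) (arr.drop (s+1)) = pvAddAll mk (pvAddAll mk acc p) (arr.drop s) := by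
          rw [← pvAddAll_append, hq, ← pvAddAll_append, List.append_assoc, List.singleton_append, ← hd]
        by_cases hs1 : s + 1 < arr.length
        · have hcond1 : (s + 1 < arr.length ∧ 2 ≤ q.length + (arr.length - (s+1))) := ⟨hs1, by omega⟩
          rw [if_pos hcond1, hSq, hqd]
          have h3 : pvAddAll mk (pvAddAll mk (pvAddAll mk acc p) (arr.drop s)) p = pvAddAll mk (pvAddAll mk acc p) (arr.drop s) :=
            pvAddAll_nochange fun e he => mem_pvAddAll_mono (mk_mem_pvAddAll he)
          have h4 : pvAddAll mk (pvAddAll mk (pvAddAll mk acc p) (arr.drop s)) (arr.drop (s+1)) = pvAddAll mk (pvAddAll mk acc p) (arr.drop s) :=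
            pvAddAll_nochange fun e he => mk_mem_pvAddAll (by rw [hd]; exact List.mem_cons_of_mem _ he)
          by_cases hc2 : s + 1 < arr.length ∧ 2 ≤ p.length + (arr.length - (s+1))
          · rw [if_pos hc2, h3, h4, if_pos ⟨hs, hC⟩]
          · rw [if_neg hc2, if_pos ⟨hs, hC⟩]
        · have hn : arr.length = s + 1 := by omega
          have hq1 : 1 < q.length := by omega
          have hd1 : arr.drop (s+1) = [] := List.drop_eq_nil_of_le (by omega)
          rw [if_neg (by omega), if_neg (by omega), if_pos hq1, if_pos (show s < arr.length ∧ 2 ≤ p.length + (arr.length - s) from ⟨hs, hC⟩), ← hqd, hd1]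
          rfl
      · -- degenerate: p = [] and arr.length = s+1
        have h1 : ¬ (s + 1 < arr.length ∧ 2 ≤ q.length + (arr.length - (s+1))) := by omega
        have h2 : ¬ (s + 1 < arr.length ∧ 2 ≤ p.length + (arr.length - (s+1))) := by omega
        rw [if_neg h1, if_neg h2, if_neg (show ¬ (1:Nat) < q.length by omega),
            if_neg (show ¬ (s < arr.length ∧ 2 ≤ p.length + (arr.length - s)) by omega)]
    · rw [pvChildren, dif_neg hs, if_neg (by tauto)]
      rfl

def pvMkA : String → List (List String) := fun e => [["0"], [e]]
def pvMkF : String → List (List String) := fun e => [[e], ["0"]]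

lemma gen_eq_children (xs : List String) : generar_combinaciones xs = pvChildren xs 0 [] := by
  rw [generar_combinaciones, pvBtrack]; rfl

lemma gen_eq_nil_iff (xs : List String) : generar_combinaciones xs = [] ↔ xs = [] := by
  rw [gen_eq_children]
  cases xs with
  | nil => rw [pvChildren]; simp
  | cons x t =>
    rw [pvChildren]
    simp [pvBtrack]

lemma pvProc_gen (mk : String → List (List String)) (xs : List String) :
    pvProc mk (generar_combinaciones xs) [] =
      if 1 < xs.length then pvAddAll mk [] xs else [] := by
  rw [gen_eq_children, pvProc_children mk xs xs.length 0 [] [] (by omega)]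
  simp only [List.length_nil, Nat.zero_add, Nat.sub_zero]
  by_cases h2 : 1 < xs.length
  · rw [if_pos ⟨by omega, by omega⟩, if_pos h2, List.drop_zero]
    rfl
  · rw [if_neg (by omega), if_neg h2]

lemma parejas_actual (arr : List String) (vac : List (List (List String))) :
    generar_parejas_vacio arr vac "actual" = pvAddAll pvMkA vac arr := by
  unfold generar_parejas_vacio pvAddAll pvMkA
  exact PySem.List.foldl_congr_mem _ _ _ _ (fun acc x _ => by simp)

lemma parejas_futuro (arr : List String) (vac : List (List (List String))) :
    generar_parejas_vacio arr vac "futuro" = pvAddAll pvMkF vac arr := by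
  unfold generar_parejas_vacio pvAddAll pvMkF
  exact PySem.List.foldl_congr_mem _ _ _ _ (fun acc x _ => by simp)

lemma pvProc_mem_mono {mk cs acc} {y : List (List String)} (h : y ∈ acc) : y ∈ pvProc mk cs acc := by
  induction cs generalizing acc with
  | nil => exact h
  | cons c cs ih =>
    simp only [pvProc, List.foldl_cons]
    exact ih (by split <;> [exact mem_pvAddAll_mono h; exact h])

lemma pvProc_covers {mk cs acc} {c : List String} {e : String}
    (hc : c ∈ cs) (h1 : 1 < c.length) (he : e ∈ c) : mk e ∈ pvProc mk cs acc := by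
  induction cs generalizing acc with
  | nil => cases hc
  | cons d cs ih =>
    simp only [pvProc, List.foldl_cons]
    rcases List.mem_cons.1 hc with rfl | hc'
    · exact pvProc_mem_mono (by rw [if_pos h1]; exact mk_mem_pvAddAll he)
    · exact ih hc'

lemma pvProc_nochange {mk cs acc} (h : ∀ c ∈ cs, 1 < c.length → ∀ e ∈ c, mk e ∈ acc) :
    pvProc mk cs acc = acc := by
  induction cs generalizing acc with
  | nil => rfl
  | cons c cs ih =>
    simp only [pvProc, List.foldl_cons]
    have hc : (if 1 < c.length then pvAddAll mk acc c else acc) = acc := by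
      split
      · exact pvAddAll_nochange (h c List.mem_cons_self ‹_›)
      · rfl
    rw [hc]
    exact ih fun d hd h1 e he => h d (List.mem_cons_of_mem _ hd) h1 e he

lemma pvProc_idem (mk : String → List (List String)) (cs : List (List String)) (acc) :
    pvProc mk cs (pvProc mk cs acc) = pvProc mk cs acc :=
  pvProc_nochange fun _ hc h1 _ he => pvProc_covers hc h1 he

lemma foldl_const_fix {α β : Type} (h : α → α) (hid : ∀ x, h (h x) = h x) :
    ∀ (l : List β) (x : α), l.foldl (fun a _ => h a) (h x) = h x := by
  intro l
  induction l with
  | nil => intro x; rfl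
  | cons b t ih => intro x; simpa [hid] using ih x

lemma foldl_const_idem {α β : Type} (h : α → α) (hid : ∀ x, h (h x) = h x)
    (l : List β) (x : α) : l.foldl (fun a _ => h a) x = if l = [] then x else h x := by
  cases l with
  | nil => rfl
  | cons b t => simpa using foldl_const_fix h hid t x

lemma foldl_prod3 {α β γ ι : Type} (f : α → ι → α) (g : β → ι → β) (h : γ → ι → γ) :
    ∀ (l : List ι) (x : α) (y : β) (z : γ),
    l.foldl (fun s c => (f s.1 c, g s.2.1 c, h s.2.2 c)) (x, y, z) =
      (l.foldl f x, l.foldl g y, l.foldl h z) := by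
  intro l
  induction l with
  | nil => intros; rfl
  | cons c t ih => intro x y z; simpa using ih (f x c) (g y c) (h z c)

lemma pvAddAll_eq_map_dedup (mk : String → List (List String))
    (hinj : ∀ a b, mk a = mk b → a = b) :
    ∀ (xs seen : List String),
    pvAddAll mk (seen.map mk) xs =
      (xs.foldl (fun s e => if e ∈ s then s else s ++ [e]) seen).map mk := by
  intro xs
  induction xs with
  | nil => intro seen; rfl
  | cons x t ih =>
    intro seen
    have hmem : (mk x ∈ seen.map mk) ↔ x ∈ seen := by
      constructor
      · intro h
        obtain ⟨a, ha, he⟩ := List.mem_map.1 h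
        exact (hinj a x he) ▸ ha
      · exact fun h => List.mem_map_of_mem h
    simp only [pvAddAll, List.foldl_cons] at *
    by_cases h : x ∈ seen
    · rw [if_pos (hmem.2 h), if_pos h, ih seen]
    · rw [if_neg (fun hx => h (hmem.1 hx)), if_neg h, show seen.map mk ++ [mk x] = (seen ++ [x]).map mk by simp, ih (seen ++ [x])]

def pvProd (c0 c1 : List String) (nums dens : List (List String)) : List (List (List String)) :=
  nums.foldl (fun fc comb => dens.foldl (fun fc comb2 =>
    if ¬(comb = c0 ∧ comb2 = c1) then fc ++ [[comb, comb2]] else fc) fc) []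

def pvVAf (nums dens : List (List String)) : List (List (List String)) :=
  nums.foldl (fun va _ => dens.foldl (fun va comb2 =>
    if 1 < comb2.length then pvAddAll pvMkA va comb2 else va) va) []

def pvVFf (nums dens : List (List String)) : List (List (List String)) :=
  nums.foldl (fun vf comb => dens.foldl (fun vf _ =>
    if 1 < comb.length then pvAddAll pvMkF vf comb else vf) vf) []

lemma A_char (c0 c1 : List String) (rest : List (List String)) :
    generate_full_combs (c0 :: c1 :: rest) =
      pvProd c0 c1 (generar_combinaciones c0) (generar_combinaciones c1)
      ++ pvVAf (generar_combinaciones c0) (generar_combinaciones c1)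
      ++ pvVFf (generar_combinaciones c0) (generar_combinaciones c1) := by
  show (List.foldl _ ([], [], []) (generar_combinaciones c0)).1 ++ _ ++ _ = _
  set nums := generar_combinaciones c0
  set dens := generar_combinaciones c1
  have hinner : ∀ (comb : List String) (st : (List (List (List String))) × (List (List (List String))) × (List (List (List String)))),
      dens.foldl (fun st comb2 =>
        let vf := if 1 < comb.length then generar_parejas_vacio comb st.2.2 "futuro" else st.2.2
        let va := if 1 < comb2.length then generar_parejas_vacio comb2 st.2.1 "actual" else st.2.1
        let fc := if ¬(comb = c0 ∧ comb2 = c1) then st.1 ++ [[comb, comb2]] else st.1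
        (fc, va, vf)) st
      = (dens.foldl (fun fc comb2 => if ¬(comb = c0 ∧ comb2 = c1) then fc ++ [[comb, comb2]] else fc) st.1,
         dens.foldl (fun va comb2 => if 1 < comb2.length then pvAddAll pvMkA va comb2 else va) st.2.1,
         dens.foldl (fun vf _ => if 1 < comb.length then pvAddAll pvMkF vf comb else vf) st.2.2) := by
    intro comb st
    obtain ⟨x, y, z⟩ := st
    rw [← foldl_prod3]
    exact List.foldl_ext _ _ _ (fun a b hb => by
      simp only [parejas_actual, parejas_futuro])
  rw [List.foldl_ext _ (fun st comb =>
        (dens.foldl (fun fc comb2 => if ¬(comb = c0 ∧ comb2 = c1) then fc ++ [[comb, comb2]] else fc) st.1,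
         dens.foldl (fun va comb2 => if 1 < comb2.length then pvAddAll pvMkA va comb2 else va) st.2.1,
         dens.foldl (fun vf _ => if 1 < comb.length then pvAddAll pvMkF vf comb else vf) st.2.2))
      ([], [], []) (fun st comb _ => hinner comb st),
      foldl_prod3
        (fun fc comb => dens.foldl (fun fc comb2 => if ¬(comb = c0 ∧ comb2 = c1) then fc ++ [[comb, comb2]] else fc) fc)
        (fun va comb => dens.foldl (fun va comb2 => if 1 < comb2.length then pvAddAll pvMkA va comb2 else va) va)
        (fun vf comb => dens.foldl (fun vf _ => if 1 < comb.length then pvAddAll pvMkF vf comb else vf) vf)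
        nums [] [] []]
  rfl

lemma pvVAf_char (nums dens : List (List String)) :
    pvVAf nums dens = if nums = [] then [] else pvProc pvMkA dens [] := by
  unfold pvVAf
  exact foldl_const_idem (pvProc pvMkA dens) (pvProc_idem pvMkA dens) nums []

lemma pvVFf_char (nums dens : List (List String)) :
    pvVFf nums dens = if dens = [] then [] else pvProc pvMkF nums [] := by
  unfold pvVFf
  by_cases hd : dens = []
  · subst hd
    simp only [if_pos rfl, List.foldl_nil]
    exact List.foldl_ext _ (fun vf _ => vf) [] (fun a b _ => rfl) |>.trans (by
      induction nums with
      | nil => rfl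
      | cons c t ih => simpa using ih)
  · rw [if_neg hd]
    refine (List.foldl_ext _ (fun vf comb => if 1 < comb.length then pvAddAll pvMkF vf comb else vf) [] (fun a comb _ => ?_)).trans rfl
    have hidem : ∀ x, (if 1 < comb.length then pvAddAll pvMkF (if 1 < comb.length then pvAddAll pvMkF x comb else x) comb else (if 1 < comb.length then pvAddAll pvMkF x comb else x)) = if 1 < comb.length then pvAddAll pvMkF x comb else x := by
      intro x
      by_cases h1 : 1 < comb.length
      · simp only [if_pos h1]
        exact pvAddAll_nochange fun e he => mk_mem_pvAddAll he
      · simp only [if_neg h1]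
    rw [foldl_const_idem _ hidem dens a, if_neg hd]

lemma pvProd_char (c0 c1 : List String) (nums dens : List (List String)) :
    pvProd c0 c1 nums dens =
      nums.flatMap (fun a => (dens.filter (fun b => ¬(a = c0 ∧ b = c1))).map (fun b => [a, b])) := by
  unfold pvProd
  rw [List.foldl_ext _ (fun fc comb => fc ++ (dens.filter (fun b => decide (¬(comb = c0 ∧ b = c1)))).map (fun b => [comb, b])) []
      (fun fc comb _ => PySem.List.foldl_append_ite _ _ dens fc),
      PySem.List.foldl_append_eq_flatMap]
  simp

lemma pvMkA_inj : ∀ a b, pvMkA a = pvMkA b → a = b := fun a b h => by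
  simpa [pvMkA] using h
lemma pvMkF_inj : ∀ a b, pvMkF a = pvMkF b → a = b := fun a b h => by
  simpa [pvMkF] using h

lemma pvAddAll_nil_eq (mk : String → List (List String))
    (hinj : ∀ a b, mk a = mk b → a = b) (xs : List String) :
    pvAddAll mk [] xs = (pvDedup xs).map mk := by
  simpa [pvDedup] using pvAddAll_eq_map_dedup mk hinj xs []

lemma childrenAlt_eq (arr : List String) :
    ∀ (k s : Nat) (p : List String), arr.length - s ≤ k →
    pvChildrenAlt arr s p = pvChildren arr s p := by
  intro k
  induction k with
  | zero =>
    intro s p hk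
    rw [pvChildrenAlt, pvChildren, dif_neg (by omega), dif_neg (by omega)]
  | succ k ih =>
    intro s p hk
    by_cases hs : s < arr.length
    · rw [pvChildrenAlt, pvChildren, dif_pos hs, dif_pos hs, pvBtrackAlt, pvBtrack,
          ih (s+1) (p ++ [arr[s]]) (by omega), ih (s+1) p (by omega)]
    · rw [pvChildrenAlt, pvChildren, dif_neg hs, dif_neg hs]

lemma gen_alt_eq (xs : List String) : generar_combinaciones_alt xs = generar_combinaciones xs := by
  rw [generar_combinaciones_alt, generar_combinaciones, pvBtrackAlt, pvBtrack]
  simp [childrenAlt_eq xs xs.length 0 [] (by omega)]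

lemma final_char (c0 c1 : List String) (rest : List (List String)) :
    generate_full_combs (c0 :: c1 :: rest) = generate_full_combs_alt (c0 :: c1 :: rest) := by
  rw [A_char, pvVAf_char, pvVFf_char, pvProd_char, pvProc_gen, pvProc_gen,
      pvAddAll_nil_eq pvMkA pvMkA_inj, pvAddAll_nil_eq pvMkF pvMkF_inj]
  by_cases h0 : generar_combinaciones c0 = []
  · have hc0 : c0 = [] := (gen_eq_nil_iff c0).1 h0
    subst hc0
    simp [generate_full_combs_alt, gen_alt_eq, h0, List.getD_cons_zero, List.getD_cons_succ]
  · by_cases h1 : generar_combinaciones c1 = []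
    · have hc1 : c1 = [] := (gen_eq_nil_iff c1).1 h1
      subst hc1
      simp [generate_full_combs_alt, gen_alt_eq, h0, h1, List.getD_cons_zero, List.getD_cons_succ]
    · simp only [generate_full_combs_alt, gen_alt_eq, List.getD_cons_zero, List.getD_cons_succ, if_pos (And.intro h0 h1), ne_eq, h0, h1,
        not_false_eq_true, and_self, if_neg h0, if_neg h1, pvMkA, pvMkF]
      split_ifs <;> first
        | exact (‹False›).elim
        | rfl
        | simp [List.append_assoc, pvMkA, pvMkF]

-- ===== VERDICT (by name: the statement is the Claim_ definition above) =====
theorem generate_full_combs_spec : Claim_equal_generate_full_combs := by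
  intro component hdom hpre
  match component with
  | c0 :: c1 :: rest => exact final_char c0 c1 rest
  | [] => exact absurd hpre (by simp [Pre_generate_full_combs])
  | [c0] => exact absurd hpre (by simp [Pre_generate_full_combs])
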